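-- pv_equiv track=rewrite | github.com/zachatkinson/bf1942-portal-conversion | tools/generate_tree_fallbacks.py | generate_fallback_for_mapping
-- ===== SOURCE A (Python) =====
-- from typing import Any
--
-- def generate_fallback_for_mapping(
--     mapping: dict[str, Any], map_trees: dict[str, list[str]], variety_pool: list[str]
-- ) -> dict[str, str]:
--     """Generate map-specific fallbacks for a tree mapping.
--
--     Args:
--         mapping: Tree mapping entry from bf1942_to_portal_mappings.json
--         map_trees: Map-to-trees lookup (from get_trees_by_map)
--         variety_pool: List of tree types to use for variety
--
--     Returns:
--         Dict mapping map name to fallback tree type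
--
--     Strategy:
--         1. For each map, check which trees from variety_pool are available
--         2. Use first available tree from variety_pool as fallback
--         3. If no variety_pool trees available, use any available tree
--     """
--     fallbacks: dict[str, str] = {}
--
--     for map_name, available_trees in map_trees.items():
--         # Try to use a tree from variety_pool first (maintains variety)
--         for tree in variety_pool:
--             if tree in available_trees:
--                 fallbacks[map_name] = tree
--                 break
--         else:
--             # No variety_pool tree available - use first available tree
--             if available_trees:
--                 fallbacks[map_name] = available_trees[0]
--
--     return fallbacks
-- ===== SOURCE B (Python) =====
-- def generate_fallback_for_mapping(mapping, map_trees, variety_pool):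
--     # Build a first-occurrence index of the variety pool once, then pick per map
--     # the available tree with the minimum pool index (no rescan of the pool per map).
--     pool_index = {}
--     for i, tree in enumerate(variety_pool):
--         if tree not in pool_index:
--             pool_index[tree] = i
--
--     fallbacks = {}
--     for map_name, available_trees in map_trees.items():
--         best = None
--         for tree in available_trees:
--             i = pool_index.get(tree)
--             if i is not None and (best is None or i < best[1]):
--                 best = (tree, i)
--         if best is not None:
--             fallbacks[map_name] = best[0]
--         elif available_trees:
--             fallbacks[map_name] = available_trees[0]
--     return fallbacks
-- ===== Notes on version B (the rewrite author's own statement) =====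
-- stated objective: faster
-- what changed: Instead of rescanning variety_pool for every map with a linear membership test into available_trees, B builds a first-occurrence index of the pool once and, per map, takes the available tree with the minimum pool index in one pass over available_trees.
import Mathlib
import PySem

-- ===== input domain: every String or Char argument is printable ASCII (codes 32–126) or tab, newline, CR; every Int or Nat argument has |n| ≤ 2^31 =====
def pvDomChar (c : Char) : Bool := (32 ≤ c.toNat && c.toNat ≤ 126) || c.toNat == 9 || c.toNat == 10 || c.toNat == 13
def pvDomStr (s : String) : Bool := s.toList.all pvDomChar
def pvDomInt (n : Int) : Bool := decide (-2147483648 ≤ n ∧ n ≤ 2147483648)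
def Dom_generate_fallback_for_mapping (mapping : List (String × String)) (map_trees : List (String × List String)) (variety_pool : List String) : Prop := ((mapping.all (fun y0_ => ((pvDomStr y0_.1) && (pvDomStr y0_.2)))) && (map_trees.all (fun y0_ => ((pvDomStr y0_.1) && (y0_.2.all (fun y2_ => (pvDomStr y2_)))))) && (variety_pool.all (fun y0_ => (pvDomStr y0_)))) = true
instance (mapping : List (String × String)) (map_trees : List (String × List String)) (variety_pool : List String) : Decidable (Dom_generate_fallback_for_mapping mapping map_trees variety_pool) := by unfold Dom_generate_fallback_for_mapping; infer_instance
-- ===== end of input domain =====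

-- B replaces A's per-map rescan of variety_pool by a first-occurrence pool index built
-- once plus a minimum-index pass over each map's available trees (objective: faster).

-- ===== PORT A =====
-- inner 'for tree in variety_pool: if tree in available_trees: … break / else: …'
def pvFindPool : List String → List String → Option String
  | [], _ => none
  | t :: rest, avail => if avail.contains t then some t else pvFindPool rest avail

def generate_fallback_for_mapping (mapping : List (String × String)) (map_trees : List (String × List String)) (variety_pool : List String) : List (String × String) :=
  ((PySem.Dict.ofList map_trees).items.foldl
    (fun (fallbacks : PySem.Dict String String) p =>
      match pvFindPool variety_pool p.2 with
      | some tree => fallbacks.insert p.1 tree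
      | none =>
        match p.2 with
        | [] => fallbacks
        | a :: _ => fallbacks.insert p.1 a)
    PySem.Dict.empty).items

-- ===== PORT B =====
-- 'for i, tree in enumerate(variety_pool): if tree not in pool_index: pool_index[tree] = i'
def pvPoolIndex (variety_pool : List String) : PySem.Dict String Int :=
  (PySem.List.enumerate variety_pool 0).foldl
    (fun d p => if d.contains p.2 then d else d.insert p.2 p.1) PySem.Dict.empty

-- 'best = None; for tree in available_trees: i = pool_index.get(tree); if i is not None and (best is None or i < best[1]): best = (tree, i)'
def pvBestTree (pool : PySem.Dict String Int) : List String → Option (String × Int) → Option (String × Int)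
  | [], best => best
  | t :: rest, best =>
    match pool.get? t with
    | none => pvBestTree pool rest best
    | some i =>
      match best with
      | none => pvBestTree pool rest (some (t, i))
      | some b => if i < b.2 then pvBestTree pool rest (some (t, i)) else pvBestTree pool rest best

def generate_fallback_for_mapping_alt (mapping : List (String × String)) (map_trees : List (String × List String)) (variety_pool : List String) : List (String × String) :=
  let pool := pvPoolIndex variety_pool
  ((PySem.Dict.ofList map_trees).items.foldl
    (fun (fallbacks : PySem.Dict String String) p =>
      match pvBestTree pool p.2 none with
      | some b => fallbacks.insert p.1 b.1
      | none =>
        match p.2 with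
        | [] => fallbacks
        | a :: _ => fallbacks.insert p.1 a)
    PySem.Dict.empty).items

-- ===== PRECONDITION & SPEC =====
def Spec_generate_fallback_for_mapping (mapping : List (String × String)) (map_trees : List (String × List String)) (variety_pool : List String) (out : List (String × String)) : Prop := out = generate_fallback_for_mapping_alt mapping map_trees variety_pool
instance (mapping : List (String × String)) (map_trees : List (String × List String)) (variety_pool : List String) (out : List (String × String)) : Decidable (Spec_generate_fallback_for_mapping mapping map_trees variety_pool out) := by unfold Spec_generate_fallback_for_mapping; infer_instance

-- ===== CLAIM (what is proved, stated in full; the proofs are below) =====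
def Claim_equal_generate_fallback_for_mapping : Prop := ∀ (mapping : List (String × String)) (map_trees : List (String × List String)) (variety_pool : List String), Dom_generate_fallback_for_mapping mapping map_trees variety_pool → Spec_generate_fallback_for_mapping mapping map_trees variety_pool (generate_fallback_for_mapping mapping map_trees variety_pool)

-- ===== LEMMAS AND PROOFS =====

-- first-occurrence index of t in vp, as Python stores it (an Int)
def pvIdxI (t : String) (vp : List String) : Option Int :=
  (List.idxOf? t vp).map (fun n => (n : Int))

theorem pvIdxI_nil (t : String) : pvIdxI t [] = none := rfl

theorem pvIdxI_cons (t h : String) (rest : List String) :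
    pvIdxI t (h :: rest) = if h = t then some 0 else (pvIdxI t rest).map (· + 1) := by
  unfold pvIdxI
  rw [List.idxOf?_cons]
  by_cases he : h = t
  · simp [he]
  · have : (h == t) = false := by simp [he]
    simp only [this, Bool.false_eq_true, if_neg, not_false_eq_true, if_neg he]
    cases List.idxOf? t rest <;> simp

theorem pvIdxI_nonneg (t : String) (vp : List String) (i : Int) (h : pvIdxI t vp = some i) : 0 ≤ i := by
  unfold pvIdxI at h
  cases hx : List.idxOf? t vp with
  | none => simp [hx] at h
  | some n => rw [hx] at h; simp at h; omega

-- pool lookup = first occurrence index in variety_pool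
theorem pvPoolIndex_get_aux (t : String) : ∀ (vp : List String) (d : PySem.Dict String Int) (k : Int),
    ((PySem.List.enumerate vp k).foldl (fun d p => if d.contains p.2 then d else d.insert p.2 p.1) d).get? t
      = if d.contains t then d.get? t else (pvIdxI t vp).map (· + k) := by
  intro vp
  induction vp with
  | nil =>
    intro d k
    by_cases ht : d.contains t = true
    · simp [PySem.List.enumerate_nil, ht]
    · simp only [PySem.List.enumerate_nil, List.foldl_nil, ht, if_neg, pvIdxI_nil,
        Bool.false_eq_true, not_false_eq_true, Option.map_none]
      exact (PySem.Dict.get?_eq_none_iff_contains d t).2 (by simpa using ht)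
  | cons h rest ih =>
    intro d k
    rw [PySem.List.enumerate_cons]
    simp only [List.foldl_cons]
    by_cases hc : d.contains h = true
    · rw [if_pos hc, ih d (k + 1)]
      by_cases ht : d.contains t = true
      · simp [ht]
      · have he : ¬ h = t := fun e => ht (e ▸ hc)
        simp only [ht, if_neg, Bool.false_eq_true, not_false_eq_true, pvIdxI_cons, he, if_neg]
        cases pvIdxI t rest <;> simp <;> ring
    · rw [if_neg hc, ih (d.insert h k) (k + 1), PySem.Dict.contains_insert,
        PySem.Dict.get?_insert, pvIdxI_cons]
      by_cases ht : t = h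
      · subst ht; simp [hc]
      · have h1 : (t == h) = false := by simp [ht]
        have h2 : ¬ h = t := fun e => ht e.symm
        simp only [h1, Bool.false_or, if_neg ht, if_neg h2]
        by_cases htc : d.contains t = true
        · simp [htc]
        · simp only [htc, if_neg, Bool.false_eq_true, not_false_eq_true]
          cases pvIdxI t rest <;> simp <;> ring

theorem pvPoolIndex_get (vp : List String) (t : String) :
    (pvPoolIndex vp).get? t = pvIdxI t vp := by
  rw [pvPoolIndex, pvPoolIndex_get_aux]
  simp [PySem.Dict.contains_empty]

-- pvBestTree with the pool dict replaced by first-occurrence lookups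
def pvBI (vp : List String) : List String → Option (String × Int) → Option (String × Int)
  | [], b => b
  | t :: rest, b =>
    match pvIdxI t vp with
    | none => pvBI vp rest b
    | some i =>
      match b with
      | none => pvBI vp rest (some (t, i))
      | some p => if i < p.2 then pvBI vp rest (some (t, i)) else pvBI vp rest b

theorem pvBestTree_eq_pvBI (vp : List String) : ∀ (avail : List String) (b : Option (String × Int)),
    pvBestTree (pvPoolIndex vp) avail b = pvBI vp avail b := by
  intro avail
  induction avail with
  | nil => intro b; rfl
  | cons t rest ih =>
    intro b
    simp only [pvBestTree, pvBI, pvPoolIndex_get vp t]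
    cases pvIdxI t vp with
    | none => exact ih b
    | some i =>
      cases b with
      | none => exact ih _
      | some p => by_cases hi : i < p.2 <;> simp [hi, ih]

theorem pvBI_nil_vp : ∀ (avail : List String) (b : Option (String × Int)), pvBI [] avail b = b := by
  intro avail
  induction avail with
  | nil => intro b; rfl
  | cons t rest ih => intro b; simp [pvBI, pvIdxI_nil, ih]

-- once the minimum possible index 0 (whose tree is h) is held, it never changes
theorem pvBI_keep_zero (h : String) (rest : List String) :
    ∀ (avail : List String), pvBI (h :: rest) avail (some (h, 0)) = some (h, 0) := by
  intro avail
  induction avail with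
  | nil => rfl
  | cons t arest ih =>
    simp only [pvBI]
    cases hx : pvIdxI t (h :: rest) with
    | none => exact ih
    | some i =>
      have hi : 0 ≤ i := pvIdxI_nonneg _ _ _ hx
      simp only [show ¬ i < (0:Int) by omega, if_neg, ih, not_false_eq_true]

theorem pvBI_head_mem (h : String) (rest : List String) :
    ∀ (avail : List String) (b : Option (String × Int)), h ∈ avail →
    (b = none ∨ ∃ t i, b = some (t, i) ∧ 0 ≤ i ∧ (i = 0 → t = h)) →
    pvBI (h :: rest) avail b = some (h, 0) := by
  intro avail
  induction avail with
  | nil => intro b hm; simp at hm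
  | cons a arest ih =>
    intro b hm hinv
    simp only [pvBI]
    by_cases ha : a = h
    · subst ha
      have h0 : pvIdxI a (a :: rest) = some 0 := by simp [pvIdxI_cons]
      rw [h0]
      rcases hinv with hb | ⟨t, i, hb, hi0, hiz⟩
      · subst hb; exact pvBI_keep_zero a rest arest
      · subst hb
        by_cases hlt : (0:Int) < i
        · simp only [hlt, if_pos]; exact pvBI_keep_zero a rest arest
        · have : i = 0 := by omega
          subst this
          rw [hiz rfl]
          simp only [lt_irrefl, if_neg, not_false_eq_true]
          exact pvBI_keep_zero a rest arest
    · have hm' : h ∈ arest := by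
        cases hm with
        | head => exact absurd rfl ha
        | tail _ hh => exact hh
      cases hx : pvIdxI a (h :: rest) with
      | none => exact ih b hm' hinv
      | some i =>
        have hge : 0 ≤ i := pvIdxI_nonneg _ _ _ hx
        have hz : i = 0 → a = h := by
          intro hiz
          subst hiz
          rw [pvIdxI_cons] at hx
          by_cases he : h = a
          · exact he.symm
          · rw [if_neg he] at hx
            cases hy : pvIdxI a rest with
            | none => rw [hy] at hx; simp at hx
            | some m =>
              rw [hy] at hx
              have hm0 : 0 ≤ m := pvIdxI_nonneg _ _ _ hy
              simp at hx
              omega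
        rcases hinv with hb | ⟨t, j, hb, hj0, hjz⟩
        · subst hb
          exact ih _ hm' (Or.inr ⟨a, i, rfl, hge, hz⟩)
        · subst hb
          by_cases hlt : i < j
          · simp only [hlt, if_pos]
            exact ih _ hm' (Or.inr ⟨a, i, rfl, hge, hz⟩)
          · simp only [hlt, if_neg, not_false_eq_true]
            exact ih _ hm' (Or.inr ⟨t, j, rfl, hj0, hjz⟩)

-- dropping the pool head shifts every stored index by one when the head is never available
theorem pvBI_shift (h : String) (rest : List String) :
    ∀ (avail : List String) (b : Option (String × Int)), (∀ t ∈ avail, t ≠ h) →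
    pvBI (h :: rest) avail (b.map (fun p => (p.1, p.2 + 1))) = (pvBI rest avail b).map (fun p => (p.1, p.2 + 1)) := by
  intro avail
  induction avail with
  | nil => intro b _; rfl
  | cons a arest ih =>
    intro b hne
    have ha : ¬ h = a := fun e => hne a List.mem_cons_self e.symm
    have hrest : ∀ t ∈ arest, t ≠ h := fun t ht => hne t (List.mem_cons_of_mem a ht)
    simp only [pvBI, pvIdxI_cons, if_neg ha]
    cases hx : pvIdxI a rest with
    | none => exact ih b hrest
    | some i =>
      simp only [Option.map_some]
      cases b with
      | none =>
        simp only [Option.map_none]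
        exact ih (some (a, i)) hrest
      | some p =>
        simp only [Option.map_some]
        by_cases hlt : i < p.2
        · simp only [show i + 1 < p.2 + 1 by omega, if_pos, hlt]
          exact ih (some (a, i)) hrest
        · simp only [show ¬ (i + 1 < p.2 + 1) by omega, if_neg, hlt, not_false_eq_true]
          exact ih (some p) hrest

-- A's first-in-pool-order scan returns exactly the tree of B's minimum pool index
theorem pvFindPool_eq (vp : List String) : ∀ (avail : List String),
    pvFindPool vp avail = (pvBI vp avail none).map Prod.fst := by
  induction vp with
  | nil => intro avail; simp [pvFindPool, pvBI_nil_vp]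
  | cons h rest ih =>
    intro avail
    by_cases hm : h ∈ avail
    · rw [pvBI_head_mem h rest avail none hm (Or.inl rfl)]
      simp [pvFindPool, hm]
    · have hcon : avail.contains h = false := by
        simp [List.contains_eq_mem, hm]
      have hne : ∀ t ∈ avail, t ≠ h := fun t ht he => hm (he ▸ ht)
      have hs := pvBI_shift h rest avail none hne
      simp only [Option.map_none] at hs
      simp only [pvFindPool, hcon, Bool.false_eq_true, if_neg, not_false_eq_true, ih, hs,
        Option.map_map]
      rfl

-- the two per-map step functions agree
theorem pvStep_eq (vp : List String) :
    (fun (fallbacks : PySem.Dict String String) (p : String × List String) =>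
      match pvFindPool vp p.2 with
      | some tree => fallbacks.insert p.1 tree
      | none =>
        match p.2 with
        | [] => fallbacks
        | a :: _ => fallbacks.insert p.1 a)
    = (fun (fallbacks : PySem.Dict String String) (p : String × List String) =>
      match pvBestTree (pvPoolIndex vp) p.2 none with
      | some b => fallbacks.insert p.1 b.1
      | none =>
        match p.2 with
        | [] => fallbacks
        | a :: _ => fallbacks.insert p.1 a) := by
  funext fallbacks p
  rw [pvBestTree_eq_pvBI, pvFindPool_eq vp p.2]
  cases pvBI vp p.2 none with
  | none => rfl
  | some b => rfl

-- ===== VERDICT (by name: the statement is the Claim_ definition above) =====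
theorem generate_fallback_for_mapping_spec : Claim_equal_generate_fallback_for_mapping := by
  intro mapping map_trees variety_pool _
  show _ = _
  unfold generate_fallback_for_mapping generate_fallback_for_mapping_alt
  rw [pvStep_eq variety_pool]
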